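-- pv_equiv track=rewrite | github.com/winwinklao/carParking | admin/admin.py | tranferStore
-- ===== SOURCE A (Python) =====
-- def tranferStore(T):
--     T=str(T)
--     Stext=len(T)
--     space=(56-Stext)
--     t=T
--     l = 0
--     r = 0
--     for p in range(space):
--         if(p%2==0):
--             t=" "+t
--             l=l+1
--         else:
--             t= t+" "
--             r=r+1
--     return t
-- ===== SOURCE B (Python) =====
-- def tranferStore(T):
--     s = str(T)
--     space = 56 - len(s)
--     left = (space + 1) // 2
--     right = space // 2
--     return " " * left + s + " " * right
-- ===== Notes on version B (the rewrite author's own statement) =====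
-- stated objective: simpler
-- what changed: Replaced the alternating prepend/append loop with a closed-form computation of the left (ceil) and right (floor) pad widths and a single concatenation.
import Mathlib
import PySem

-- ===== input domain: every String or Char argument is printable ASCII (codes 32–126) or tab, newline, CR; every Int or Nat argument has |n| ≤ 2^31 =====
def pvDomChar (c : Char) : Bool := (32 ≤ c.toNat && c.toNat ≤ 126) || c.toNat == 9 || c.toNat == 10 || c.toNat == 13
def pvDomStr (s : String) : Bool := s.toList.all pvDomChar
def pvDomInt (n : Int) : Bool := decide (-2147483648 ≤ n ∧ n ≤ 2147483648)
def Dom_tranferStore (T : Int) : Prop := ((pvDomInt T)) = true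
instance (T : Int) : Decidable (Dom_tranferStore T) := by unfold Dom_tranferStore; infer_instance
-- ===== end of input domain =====

-- B replaces A's alternating prepend/append loop by a closed-form left/right pad-width
-- computation (left = ceil, right = floor of the free space) and a single concatenation.

-- ===== PORT A =====
def tranferStore (T : Int) : String :=
  let T' := (PySem.Int.toStr T).toList
  let Stext : Int := T'.length
  let space : Int := 56 - Stext
  let res := (PySem.List.pyRange 0 space 1).foldl
    (fun (acc : List Char × Int × Int) p =>
      if PySem.Int.mod p 2 == 0 then (' ' :: acc.1, acc.2.1 + 1, acc.2.2)
      else (acc.1 ++ [' '], acc.2.1, acc.2.2 + 1))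
    (T', 0, 0)
  String.mk res.1

-- ===== PORT B =====
def tranferStore_alt (T : Int) : String :=
  let s := (PySem.Int.toStr T).toList
  let space : Int := 56 - (s.length : Int)
  let left := PySem.Int.floordiv (space + 1) 2
  let right := PySem.Int.floordiv space 2
  String.mk (List.replicate left.toNat ' ' ++ s ++ List.replicate right.toNat ' ')

-- ===== PRECONDITION & SPEC =====
def Spec_tranferStore (T : Int) (out : String) : Prop := out = tranferStore_alt T
instance (T : Int) (out : String) : Decidable (Spec_tranferStore T out) := by unfold Spec_tranferStore; infer_instance

-- ===== CLAIM (what is proved, stated in full; the proofs are below) =====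
def Claim_equal_tranferStore : Prop := ∀ (T : Int), Dom_tranferStore T → Spec_tranferStore T (tranferStore T)

-- ===== LEMMAS AND PROOFS =====

-- A's loop, after n iterations, has prepended ⌈n/2⌉ spaces and appended ⌊n/2⌋ spaces.
theorem tranferStore_loop (n : Nat) (s : List Char) (l r : Int) :
    ((PySem.List.pyRange 0 (n : Int) 1).foldl
      (fun (acc : List Char × Int × Int) p =>
        if PySem.Int.mod p 2 == 0 then (' ' :: acc.1, acc.2.1 + 1, acc.2.2)
        else (acc.1 ++ [' '], acc.2.1, acc.2.2 + 1))
      (s, l, r)).1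
    = List.replicate ((n + 1) / 2) ' ' ++ s ++ List.replicate (n / 2) ' ' := by
  induction n generalizing l r with
  | zero => simp
  | succ n ih =>
    have hcast : ((n + 1 : Nat) : Int) = (n : Int) + 1 := by push_cast; ring
    rw [hcast, PySem.List.pyRange_one_succ_right (by positivity), List.foldl_append,
        List.foldl_cons, List.foldl_nil]
    have hm : PySem.Int.mod (n : Int) 2 = (n : Int) % 2 :=
      PySem.Int.mod_eq_emod_of_pos (by norm_num)
    rcases Nat.even_or_odd n with he | ho
    · obtain ⟨m, hmm⟩ := he; subst hmm
      have hmod : (PySem.Int.mod ((m + m : Nat) : Int) 2 == 0) = true := by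
        rw [hm]; simp only [beq_iff_eq]; omega
      simp only [hmod, if_true, ih]
      have h1 : (m + m + 1 + 1) / 2 = m + 1 := by omega
      have h2 : (m + m + 1) / 2 = m := by omega
      have h3 : (m + m) / 2 = m := by omega
      simp [h1, h2, h3, List.replicate_succ]
    · obtain ⟨m, hmm⟩ := ho; subst hmm
      have hmod : (PySem.Int.mod ((2 * m + 1 : Nat) : Int) 2 == 0) = false := by
        rw [hm]; simp only [beq_eq_false_iff_ne, ne_eq]; omega
      simp only [hmod, ih]
      have h1 : (2 * m + 1 + 1 + 1) / 2 = m + 1 := by omega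
      have h2 : (2 * m + 1 + 1) / 2 = m + 1 := by omega
      have h3 : (2 * m + 1) / 2 = m := by omega
      simp [h1, h2, h3, ← List.replicate_succ', List.append_assoc]

-- ===== VERDICT (by name: the statement is the Claim_ definition above) =====
theorem tranferStore_spec : Claim_equal_tranferStore := by
  intro T _
  unfold Spec_tranferStore tranferStore tranferStore_alt
  simp only []
  set s := (PySem.Int.toStr T).toList with hs
  set space : Int := 56 - (s.length : Int) with hspace
  have h1 : PySem.Int.floordiv (space + 1) 2 = (space + 1) / 2 :=
    PySem.Int.floordiv_eq_ediv_of_pos (by norm_num)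
  have h2 : PySem.Int.floordiv space 2 = space / 2 :=
    PySem.Int.floordiv_eq_ediv_of_pos (by norm_num)
  rw [h1, h2]
  rcases le_or_gt space 0 with hle | hgt
  · rw [PySem.List.pyRange_one_eq_nil hle]
    have e1 : ((space + 1) / 2).toNat = 0 := by omega
    have e2 : (space / 2).toNat = 0 := by omega
    simp [e1, e2]
  · obtain ⟨n, hn⟩ : ∃ n : Nat, (n : Int) = space :=
      ⟨space.toNat, Int.toNat_of_nonneg (le_of_lt hgt)⟩
    rw [← hn, tranferStore_loop]
    have e1 : (((n : Int) + 1) / 2).toNat = (n + 1) / 2 := by omega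
    have e2 : ((n : Int) / 2).toNat = n / 2 := by omega
    simp [e1, e2]
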